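-- pv_equiv track=rewrite | github.com/pypi-data/pypi-mirror-403 | packages/trueform/trueform-0.3.0.tar.gz/trueform-0.3.0/python/tests/test_topology_boundary.py | canonicalize_path
-- ===== SOURCE A (Python) =====
-- def canonicalize_path(path):
--     """
--     Canonicalize a closed path (loop) for comparison.
--
--     Handles closed paths where first == last by stripping the duplicate.
--     Finds canonical rotation and direction by:
--     1. Finding minimum vertex
--     2. Rotating to start at minimum
--     3. Choosing direction that gives lexicographically smaller sequence
--     """
--     if len(path) == 0:
--         return tuple()
--
--     path = list(path)
--
--     # Strip last element if path is closed (first == last)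
--     if len(path) > 1 and path[0] == path[-1]:
--         path = path[:-1]
--
--     n = len(path)
--     if n == 0:
--         return tuple()
--
--     # Find all positions of the minimum element
--     min_val = min(path)
--     min_positions = [i for i, v in enumerate(path) if v == min_val]
--
--     # Try all rotations starting from min positions, both directions
--     candidates = []
--     for pos in min_positions:
--         # Forward direction
--         forward = tuple(path[(pos + i) % n] for i in range(n))
--         candidates.append(forward)
--
--         # Reverse direction (starting from pos, going backwards)
--         reverse = tuple(path[(pos - i) % n] for i in range(n))
--         candidates.append(reverse)
--
--     # Return lexicographically smallest
--     return min(candidates)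
-- ===== SOURCE B (Python) =====
-- def canonicalize_path(path):
--     """
--     Canonicalize a closed path (loop) for comparison: lexicographically
--     smallest among all rotations of the (de-duplicated) loop in both
--     directions, built by slicing the doubled sequence.
--     """
--     path = list(path)
--     if len(path) > 1 and path[0] == path[-1]:
--         path = path[:-1]
--     if not path:
--         return tuple()
--     n = len(path)
--     candidates = [
--         tuple((seq + seq)[i:i + n])
--         for seq in (path, path[::-1])
--         for i in range(n)
--     ]
--     return min(candidates)
-- ===== Notes on version B (the rewrite author's own statement) =====
-- stated objective: alternative
-- what changed: B replaces A's min-value scan, min-position list and per-position modular-index rotations by slicing every rotation of the doubled sequence (forward and reversed) and taking the lexicographic minimum.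
import Mathlib
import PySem

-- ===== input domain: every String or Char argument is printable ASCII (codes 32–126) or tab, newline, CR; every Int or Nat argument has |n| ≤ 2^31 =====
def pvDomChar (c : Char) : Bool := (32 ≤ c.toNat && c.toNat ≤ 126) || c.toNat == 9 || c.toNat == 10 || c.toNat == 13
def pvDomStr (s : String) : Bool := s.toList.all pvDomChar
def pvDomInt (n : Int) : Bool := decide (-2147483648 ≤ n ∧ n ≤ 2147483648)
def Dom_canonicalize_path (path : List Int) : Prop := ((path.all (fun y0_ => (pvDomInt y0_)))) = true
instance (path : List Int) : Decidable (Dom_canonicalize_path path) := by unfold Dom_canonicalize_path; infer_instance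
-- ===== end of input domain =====

-- B replaces A's min-value scan, min-position list and modular-index rotations by
-- slicing every rotation of the doubled sequence (forward and reversed) and taking
-- the lexicographic minimum (objective: alternative, same result).

-- ===== PORT A =====
def canonicalize_path (path : List Int) : List Int :=
  if PySem.List.len path = 0 then []
  else
    let path1 := if 1 < PySem.List.len path ∧ PySem.List.pyGet? path 0 = PySem.List.pyGet? path (-1)
      then PySem.List.slice path none (some (-1)) else path
    let n := PySem.List.len path1
    if n = 0 then []
    else
      let min_val := (PySem.List.min? path1 (fun v => v)).getD 0
      let min_positions := ((PySem.List.enumerate path1 0).filter (fun p => decide (p.2 = min_val))).map (fun p => p.1)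
      let candidates := min_positions.foldl (fun acc pos =>
        acc ++ [(PySem.List.pyRange 0 n 1).map (fun i => PySem.List.pyGetD path1 (PySem.Int.mod (pos + i) n) 0),
                (PySem.List.pyRange 0 n 1).map (fun i => PySem.List.pyGetD path1 (PySem.Int.mod (pos - i) n) 0)]) []
      (PySem.List.min? candidates (fun c => c)).getD []

-- ===== PORT B =====
def canonicalize_path_alt (path : List Int) : List Int :=
  let path1 := if 1 < PySem.List.len path ∧ PySem.List.pyGet? path 0 = PySem.List.pyGet? path (-1)
    then PySem.List.slice path none (some (-1)) else path
  if path1 = [] then []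
  else
    let n := path1.length
    let candidates := [path1, path1.reverse].flatMap (fun seq =>
      (List.range n).map (fun (i : Nat) => PySem.List.slice (seq ++ seq) (some (i : Int)) (some ((i : Int) + (n : Int)))))
    (PySem.List.min? candidates (fun c => c)).getD []

-- ===== PRECONDITION & SPEC =====
def Spec_canonicalize_path (path : List Int) (out : List Int) : Prop := out = canonicalize_path_alt path
instance (path : List Int) (out : List Int) : Decidable (Spec_canonicalize_path path out) := by unfold Spec_canonicalize_path; infer_instance

-- ===== CLAIM (what is proved, stated in full; the proofs are below) =====
def Claim_equal_canonicalize_path : Prop := ∀ (path : List Int), Dom_canonicalize_path path → Spec_canonicalize_path path (canonicalize_path path)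

-- ===== LEMMAS AND PROOFS =====

-- rotation of a list by k
def rotL (l : List Int) (k : Nat) : List Int := l.drop k ++ l.take k

-- A's candidate list and B's candidate list, as the port subterms (proof-only helpers)
def minvalH (l : List Int) : Int := (PySem.List.min? l (fun v => v)).getD 0

def minposH (l : List Int) : List Int :=
  ((PySem.List.enumerate l 0).filter (fun p => decide (p.2 = minvalH l))).map (fun p => p.1)

def candA (l : List Int) : List (List Int) :=
  (minposH l).foldl (fun acc pos =>
    acc ++ [(PySem.List.pyRange 0 (PySem.List.len l) 1).map (fun i => PySem.List.pyGetD l (PySem.Int.mod (pos + i) (PySem.List.len l)) 0),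
            (PySem.List.pyRange 0 (PySem.List.len l) 1).map (fun i => PySem.List.pyGetD l (PySem.Int.mod (pos - i) (PySem.List.len l)) 0)]) []

def candB (l : List Int) : List (List Int) :=
  [l, l.reverse].flatMap (fun seq =>
    (List.range l.length).map (fun (i : Nat) => PySem.List.slice (seq ++ seq) (some (i : Int)) (some ((i : Int) + (l.length : Int)))))

theorem rotL_length (l : List Int) (k : Nat) : (rotL l k).length = l.length := by
  simp [rotL]; omega

theorem rotL_getElem (l : List Int) (k i : Nat) (hk : k < l.length) (hi : i < l.length) :
    (rotL l k)[i]'(by rw [rotL_length]; exact hi) = l[(k + i) % l.length]'(Nat.mod_lt _ (by omega)) := by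
  unfold rotL
  rcases Nat.lt_or_ge i (l.length - k) with h | h
  · rw [List.getElem_append_left (by simp; omega)]
    rw [List.getElem_drop]
    congr 1
    rw [Nat.mod_eq_of_lt (by omega)]
  · rw [List.getElem_append_right (by simp; omega)]
    simp only [List.getElem_take, List.length_drop]
    have hm : (k + i) % l.length = k + i - l.length := by
      rw [Nat.mod_eq_sub_mod (by omega), Nat.mod_eq_of_lt (by omega)]
    congr 1
    omega

theorem rotL_head (l : List Int) (k : Nat) (hk : k < l.length) :
    rotL l k = l[k] :: (l.drop (k+1) ++ l.take k) := by
  unfold rotL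
  rw [List.drop_eq_getElem_cons hk]
  rfl

theorem forward_eq (l : List Int) (k : Nat) (hk : k < l.length) :
    (PySem.List.pyRange 0 (PySem.List.len l) 1).map
      (fun i => PySem.List.pyGetD l (PySem.Int.mod ((k : Int) + i) (PySem.List.len l)) 0) = rotL l k := by
  have hn : 0 < l.length := by omega
  simp only [PySem.List.len_eq]
  rw [PySem.List.pyRange_zero_natCast, List.map_map]
  apply List.ext_getElem
  · simp [rotL_length]
  · intro j h1 h2
    simp only [List.getElem_map, List.getElem_range, Function.comp]
    have h3 : j < l.length := by simpa using h1
    have hc : (k : Int) + (j : Int) = ((k + j : Nat) : Int) := by push_cast; ring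
    rw [hc, PySem.Int.mod_natCast, PySem.List.pyGetD_natCast,
      List.getD_eq_getElem l 0 (Nat.mod_lt _ (by omega)), rotL_getElem l k j hk h3]

theorem reverse_eq (l : List Int) (k : Nat) (hk : k < l.length) :
    (PySem.List.pyRange 0 (PySem.List.len l) 1).map
      (fun i => PySem.List.pyGetD l (PySem.Int.mod ((k : Int) - i) (PySem.List.len l)) 0) =
    rotL l.reverse (l.length - 1 - k) := by
  have hn : 0 < l.length := by omega
  simp only [PySem.List.len_eq]
  rw [PySem.List.pyRange_zero_natCast, List.map_map]
  apply List.ext_getElem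
  · simp [rotL_length]
  · intro j h1 h2
    simp only [List.getElem_map, List.getElem_range, Function.comp]
    have h3 : j < l.length := by simpa using h1
    -- the value of the Python modulus
    set t : Nat := if j ≤ k then k - j else k + l.length - j with ht
    have htlt : t < l.length := by rw [ht]; split <;> omega
    have hmod : PySem.Int.mod ((k : Int) - (j : Int)) ((l.length : Nat) : Int) = (t : Int) := by
      rw [PySem.Int.mod_eq_emod_of_pos (by exact_mod_cast hn)]
      have hc : (k : Int) - (j : Int) = (t : Int) + (l.length : Int) * (if j ≤ k then 0 else -1) := by
        rw [ht]; split <;> omega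
      rw [hc, Int.add_mul_emod_self_left, Int.emod_eq_of_lt (by positivity) (by exact_mod_cast htlt)]
    rw [hmod, PySem.List.pyGetD_natCast, List.getD_eq_getElem l 0 htlt]
    have hk2 : l.length - 1 - k < l.reverse.length := by simp; omega
    have h4 : j < l.reverse.length := by simpa using h3
    rw [rotL_getElem l.reverse (l.length - 1 - k) j hk2 h4]
    rw [List.getElem_reverse]
    congr 1
    simp only [List.length_reverse]
    have : (l.length - 1 - k + j) % l.length = if j ≤ k then l.length - 1 - k + j else j - k - 1 := by
      split
      · exact Nat.mod_eq_of_lt (by omega)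
      · rw [Nat.mod_eq_sub_mod (by omega), Nat.mod_eq_of_lt (by omega)]
        omega
    rw [this, ht]
    split <;> omega

theorem slice_doubled (l : List Int) (i : Nat) (hi : i < l.length) :
    PySem.List.slice (l ++ l) (some (i : Int)) (some ((i : Int) + (l.length : Int))) = rotL l i := by
  rw [PySem.List.slice_natCast_add]
  apply List.ext_getElem
  · simp [rotL_length]; omega
  · intro j h1 h2
    have h3 : j < l.length := by simpa [rotL_length] using h2
    simp only [List.getElem_take, List.getElem_drop]
    rw [rotL_getElem l i j hi h3]
    rcases Nat.lt_or_ge (i + j) l.length with h | h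
    · rw [List.getElem_append_left h]
      congr 1
      rw [Nat.mod_eq_of_lt h]
    · rw [List.getElem_append_right h]
      congr 1
      rw [Nat.mod_eq_sub_mod h, Nat.mod_eq_of_lt (by omega)]

theorem mem_minposH (l : List Int) (pos : Int) :
    pos ∈ minposH l ↔ ∃ k : Nat, k < l.length ∧ pos = (k : Int) ∧ l[k]! = minvalH l := by
  unfold minposH
  simp only [List.mem_map, List.mem_filter, decide_eq_true_eq]
  constructor
  · rintro ⟨p, ⟨hpmem, hpv⟩, rfl⟩
    rw [PySem.List.mem_enumerate_iff] at hpmem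
    obtain ⟨k, hk, rfl⟩ := hpmem
    exact ⟨k, hk, by simp, by rw [getElem!_pos l k hk]; simpa using hpv⟩
  · rintro ⟨k, hk, rfl, hv⟩
    refine ⟨((k : Int), l[k]), ⟨?_, ?_⟩, rfl⟩
    · rw [PySem.List.mem_enumerate_iff]; exact ⟨k, hk, by simp⟩
    · rw [← getElem!_pos l k hk]; exact hv

theorem mem_candA (l : List Int) (c : List Int) :
    c ∈ candA l ↔ ∃ k : Nat, k < l.length ∧ l[k]! = minvalH l ∧
      (c = rotL l k ∨ c = rotL l.reverse (l.length - 1 - k)) := by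
  unfold candA
  rw [PySem.List.foldl_append_eq_flatMap]
  simp only [List.nil_append, List.mem_flatMap, List.mem_cons, List.not_mem_nil, or_false]
  constructor
  · rintro ⟨pos, hpos, hc⟩
    rw [mem_minposH] at hpos
    obtain ⟨k, hk, rfl, hv⟩ := hpos
    refine ⟨k, hk, hv, ?_⟩
    rcases hc with h | h
    · left; rw [h]; exact forward_eq l k hk
    · right; rw [h]; exact reverse_eq l k hk
  · rintro ⟨k, hk, hv, hc⟩
    refine ⟨(k : Int), (mem_minposH l _).mpr ⟨k, hk, rfl, hv⟩, ?_⟩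
    rcases hc with rfl | rfl
    · left; exact (forward_eq l k hk).symm
    · right; exact (reverse_eq l k hk).symm

theorem mem_candB (l : List Int) (c : List Int) :
    c ∈ candB l ↔ ∃ i : Nat, i < l.length ∧ (c = rotL l i ∨ c = rotL l.reverse i) := by
  unfold candB
  rw [List.mem_flatMap]
  constructor
  · rintro ⟨seq, hseq, hc⟩
    rw [List.mem_map (l := List.range l.length)] at hc
    obtain ⟨i, hi, rfl⟩ := hc
    rw [List.mem_range] at hi
    rcases List.mem_pair.mp hseq with rfl | rfl
    · exact ⟨i, hi, Or.inl (slice_doubled _ _ hi)⟩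
    · refine ⟨i, hi, Or.inr ?_⟩
      have h := slice_doubled l.reverse i (by simpa using hi)
      simp only [List.length_reverse] at h
      exact h
  · rintro ⟨i, hi, hc⟩
    rcases hc with rfl | rfl
    · refine ⟨l, List.mem_pair.mpr (Or.inl rfl), ?_⟩
      rw [List.mem_map (l := List.range l.length)]
      exact ⟨i, List.mem_range.mpr hi, slice_doubled _ _ hi⟩
    · refine ⟨l.reverse, List.mem_pair.mpr (Or.inr rfl), ?_⟩
      rw [List.mem_map (l := List.range l.length)]
      refine ⟨i, List.mem_range.mpr hi, ?_⟩
      have h := slice_doubled l.reverse i (by simpa using hi)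
      simp only [List.length_reverse] at h
      exact h

theorem minvalH_exists (l : List Int) (hl : l ≠ []) :
    ∃ k : Nat, k < l.length ∧ l[k]! = minvalH l := by
  cases h : PySem.List.min? l (fun v => v) with
  | none => exact absurd ((PySem.List.min?_eq_none_iff l _).mp h) hl
  | some m =>
    have hm : m ∈ l := PySem.List.min?_mem h
    obtain ⟨k, hk, hkm⟩ := List.mem_iff_getElem.mp hm
    refine ⟨k, hk, ?_⟩
    rw [getElem!_pos l k hk, hkm]
    unfold minvalH
    rw [h]
    rfl

theorem minvalH_le (l : List Int) (hl : l ≠ []) : ∀ y ∈ l, minvalH l ≤ y := by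
  cases h : PySem.List.min? l (fun v => v) with
  | none => exact absurd ((PySem.List.min?_eq_none_iff l _).mp h) hl
  | some m =>
    intro y hy
    have := PySem.List.min?_isMin h y hy
    unfold minvalH
    rw [h]
    exact this

theorem min?_inst_eq (L : List (List Int)) :
    @PySem.List.min? (List Int) (List Int) List.instLT (fun a b => a.decidableLT b) L (fun c => c)
    = @PySem.List.min? (List Int) (List Int) List.instLinearOrder.toLT LinearOrder.toDecidableLT L (fun c => c) := by
  unfold PySem.List.min?
  congr 1
  funext acc x
  cases acc with
  | none => rfl
  | some m =>
    exact @if_congr _ _ _ (x.decidableLT m) (LinearOrder.toDecidableLT x m) _ _ _ _ Iff.rfl rfl rfl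

theorem min?_id_eq {L1 L2 : List (List Int)} (h1 : L1 ≠ [])
    (hsub : ∀ x ∈ L1, x ∈ L2) (hdom : ∀ y ∈ L2, ∃ x ∈ L1, x ≤ y) :
    PySem.List.min? L1 (fun c => c) = PySem.List.min? L2 (fun c => c) := by
  cases h1c : PySem.List.min? L1 (fun c => c) with
  | none => exact absurd ((PySem.List.min?_eq_none_iff L1 _).mp h1c) h1
  | some m1 =>
    cases h2c : PySem.List.min? L2 (fun c => c) with
    | none =>
      have h2n := (PySem.List.min?_eq_none_iff L2 _).mp h2c
      subst h2n
      exact absurd (hsub m1 (PySem.List.min?_mem h1c)) (List.not_mem_nil)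
    | some m2 =>
      have h1' := (min?_inst_eq L1).symm.trans h1c
      have h2' := (min?_inst_eq L2).symm.trans h2c
      congr 1
      apply le_antisymm
      · obtain ⟨x, hx1, hx2⟩ := hdom m2 (PySem.List.min?_mem h2c)
        exact le_trans (PySem.List.min?_isMin h1' x hx1) hx2
      · exact PySem.List.min?_isMin h2' m1 (hsub m1 (PySem.List.min?_mem h1c))

theorem cand_min_eq (l : List Int) (hl : l ≠ []) :
    PySem.List.min? (candA l) (fun c => c) = PySem.List.min? (candB l) (fun c => c) := by
  have hn : 0 < l.length := List.length_pos_of_ne_nil hl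
  obtain ⟨k0, hk0, hv0⟩ := minvalH_exists l hl
  have hmem0 : rotL l k0 ∈ candA l := (mem_candA l _).mpr ⟨k0, hk0, hv0, Or.inl rfl⟩
  apply min?_id_eq (List.ne_nil_of_mem hmem0)
  · intro x hx
    rw [mem_candA] at hx
    obtain ⟨k, hk, hv, hc⟩ := hx
    rw [mem_candB]
    rcases hc with rfl | rfl
    · exact ⟨k, hk, Or.inl rfl⟩
    · exact ⟨l.length - 1 - k, by omega, Or.inr rfl⟩
  · intro y hy
    rw [mem_candB] at hy
    obtain ⟨i, hi, hc⟩ := hy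
    have hk0' : l[k0] = minvalH l := by rw [← getElem!_pos l k0 hk0]; exact hv0
    rcases hc with rfl | rfl
    · by_cases hv : l[i] = minvalH l
      · exact ⟨rotL l i,
          (mem_candA l _).mpr ⟨i, hi, by rw [getElem!_pos l i hi]; exact hv, Or.inl rfl⟩,
          le_refl _⟩
      · refine ⟨rotL l k0, hmem0, le_of_lt ?_⟩
        rw [rotL_head l k0 hk0, rotL_head l i hi]
        apply List.cons_lt_cons_iff.mpr
        left
        rw [hk0']
        exact lt_of_le_of_ne (minvalH_le l hl _ (l.getElem_mem hi)) (fun he => hv he.symm)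
    · have hrl : i < l.reverse.length := by simpa using hi
      by_cases hv : l.reverse[i]'hrl = minvalH l
      · refine ⟨rotL l.reverse i,
          (mem_candA l _).mpr ⟨l.length - 1 - i, by omega, ?_, Or.inr ?_⟩, le_refl _⟩
        · rw [getElem!_pos l (l.length - 1 - i) (by omega)]
          rw [List.getElem_reverse] at hv
          simpa using hv
        · congr 1
          omega
      · refine ⟨rotL l k0, hmem0, le_of_lt ?_⟩
        rw [rotL_head l k0 hk0, rotL_head l.reverse i hrl]
        apply List.cons_lt_cons_iff.mpr
        left
        rw [hk0']
        have hmem : l.reverse[i]'hrl ∈ l := by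
          have := List.getElem_mem hrl
          rwa [List.mem_reverse] at this
        exact lt_of_le_of_ne (minvalH_le l hl _ hmem) (fun he => hv he.symm)

theorem strip_ne_nil (path : List Int) (hp : path ≠ []) :
    (if 1 < PySem.List.len path ∧ PySem.List.pyGet? path 0 = PySem.List.pyGet? path (-1)
      then PySem.List.slice path none (some (-1)) else path) ≠ [] := by
  split
  · next h =>
    rw [PySem.List.slice_to_neg_one]
    intro hnil
    have h1 : 1 < path.length := by
      have h2 := h.1
      simp only [PySem.List.len_eq] at h2
      exact_mod_cast h2
    have h3 := congrArg List.length hnil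
    simp only [List.length_dropLast, List.length_nil] at h3
    omega
  · exact hp

-- ===== VERDICT (by name: the statement is the Claim_ definition above) =====
theorem canonicalize_path_spec : Claim_equal_canonicalize_path := by
  intro path _
  unfold Spec_canonicalize_path
  by_cases hp : path = []
  · subst hp; decide
  · have hlen : PySem.List.len path ≠ 0 := by
      simp [PySem.List.len_eq, List.length_eq_zero_iff]; exact hp
    set l := (if 1 < PySem.List.len path ∧ PySem.List.pyGet? path 0 = PySem.List.pyGet? path (-1)
      then PySem.List.slice path none (some (-1)) else path) with hldef
    have hl : l ≠ [] := strip_ne_nil path hp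
    have hlen2 : PySem.List.len l ≠ 0 := by
      simp [PySem.List.len_eq, List.length_eq_zero_iff]; exact hl
    show canonicalize_path path = canonicalize_path_alt path
    unfold canonicalize_path canonicalize_path_alt
    rw [if_neg hlen, ← hldef, if_neg hlen2, if_neg hl]
    have h2 := cand_min_eq l hl
    unfold candA candB minposH minvalH at h2
    simp only [PySem.List.len_eq] at h2 ⊢
    rw [h2]
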